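-- pv_equiv track=rewrite | github.com/sanikachogale1804/crm-final-2 | main.py | _has_permission_in_keys
-- ===== SOURCE A (Python) =====
-- from typing import Optional, List, Dict, Any
--
-- def _has_permission_in_keys(permission: str, permission_keys: List[str]) -> bool:
--     if not permission:
--         return True
--     if not permission_keys:
--         return False
--     if permission in permission_keys:
--         return True
--     parts = permission.split('.')
--     for i in range(len(parts), 0, -1):
--         if '.'.join(parts[:i]) in permission_keys:
--             return True
--     return any(key.startswith(f"{permission}.") for key in permission_keys)
-- ===== SOURCE B (Python) =====
-- from typing import List
--
-- def _has_permission_in_keys(permission: str, permission_keys: List[str]) -> bool: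
--     if not permission:
--         return True
--     for key in permission_keys:
--         if (key == permission
--                 or permission.startswith(key + '.')
--                 or key.startswith(permission + '.')):
--             return True
--     return False
-- ===== Notes on version B (the rewrite author's own statement) =====
-- stated objective: simpler
-- what changed: Replaces the split/join enumeration of all dot-prefixes (each checked by a full membership scan) plus a separate any() descendant scan with a single pass over permission_keys that classifies each key as equal, a dot-aligned ancestor, or a descendant of the permission.
import Mathlib
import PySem

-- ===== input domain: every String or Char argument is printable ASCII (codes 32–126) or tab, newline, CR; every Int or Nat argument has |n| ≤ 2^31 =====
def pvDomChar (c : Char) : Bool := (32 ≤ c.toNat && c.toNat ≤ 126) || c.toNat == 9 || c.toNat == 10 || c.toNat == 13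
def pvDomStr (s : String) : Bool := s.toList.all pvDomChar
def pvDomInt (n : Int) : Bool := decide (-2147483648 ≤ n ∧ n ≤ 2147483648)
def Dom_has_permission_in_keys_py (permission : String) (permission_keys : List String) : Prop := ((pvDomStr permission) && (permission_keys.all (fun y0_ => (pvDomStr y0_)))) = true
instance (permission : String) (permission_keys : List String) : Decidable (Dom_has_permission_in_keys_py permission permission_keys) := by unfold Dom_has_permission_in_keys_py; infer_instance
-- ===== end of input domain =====

-- B replaces A's split/join enumeration of all dot-prefixes (each a full membership scan)
-- plus a separate any() descendant scan by one pass over permission_keys that classifies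
-- each key as equal to, a dot-aligned ancestor of, or a descendant of the permission (simpler).

-- ===== PORT A =====
-- Strings are handled on the List Char side (PySem.Chars) throughout; String equality /
-- membership on str is equality of the code-point lists.
def has_permission_in_keys_py (permission : String) (permission_keys : List String) : Bool :=
  let p := permission.toList
  let keys := permission_keys.map String.toList
  if p = [] then true
  else if keys = [] then false
  else if keys.contains p then true
  else
    let parts := PySem.Chars.splitOn p ['.']
    -- for i in range(len(parts), 0, -1): if '.'.join(parts[:i]) in permission_keys: return True
    if (PySem.List.pyRange (parts.length : Int) 0 (-1)).any
        (fun i => keys.contains (PySem.Chars.join ['.'] (PySem.List.slice parts none (some i))))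
    then true
    else keys.any (fun key => PySem.Chars.startswith key (p ++ ['.']))

-- ===== PORT B =====
def has_permission_in_keys_py_alt (permission : String) (permission_keys : List String) : Bool :=
  let p := permission.toList
  if p = [] then true
  else permission_keys.any (fun key =>
    key.toList == p
      || PySem.Chars.startswith p (key.toList ++ ['.'])
      || PySem.Chars.startswith key.toList (p ++ ['.']))

-- ===== PRECONDITION & SPEC =====
def Spec_has_permission_in_keys_py (permission : String) (permission_keys : List String) (out : Bool) : Prop := out = has_permission_in_keys_py_alt permission permission_keys
instance (permission : String) (permission_keys : List String) (out : Bool) : Decidable (Spec_has_permission_in_keys_py permission permission_keys out) := by unfold Spec_has_permission_in_keys_py; infer_instance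

-- ===== CLAIM (what is proved, stated in full; the proofs are below) =====
def Claim_equal_has_permission_in_keys_py : Prop := ∀ (permission : String) (permission_keys : List String), Dom_has_permission_in_keys_py permission permission_keys → Spec_has_permission_in_keys_py permission permission_keys (has_permission_in_keys_py permission permission_keys)

-- ===== LEMMAS AND PROOFS =====
theorem modifyHead_id' {α : Type} (L : List α) : List.modifyHead (fun x => x) L = L := by
  cases L <;> rfl
theorem go_eq (c : Char) (fuel : Nat) (l cur : List Char) (acc : List (List Char)) (h : l.length < fuel) :
    PySem.Chars.splitOn.go [c] fuel l cur acc = acc.reverse ++ (l.splitOnP (· == c)).modifyHead (cur.reverse ++ ·) := by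
  induction fuel generalizing l cur acc with
  | zero => omega
  | succ f ih =>
    cases l with
    | nil => simp [PySem.Chars.splitOn.go]
    | cons c' rest =>
      rw [PySem.Chars.splitOn.go]
      by_cases hc : c = c'
      · subst hc
        simp only [List.isPrefixOf, beq_self_eq_true, Bool.and_true, if_true]
        rw [ih _ _ _ (by simpa using Nat.lt_of_succ_lt_succ h)]
        simp [List.splitOnP_cons, modifyHead_id']
      · have : List.isPrefixOf [c] (c' :: rest) = false := by
          simp [List.isPrefixOf]; exact hc
        rw [this]
        simp only [Bool.false_eq_true, if_false]
        rw [ih _ _ _ (by simpa using Nat.lt_of_succ_lt_succ h)]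
        rcases hsp : rest.splitOnP (· == c) with _ | ⟨hd, tl⟩
        · exact absurd hsp (List.splitOnP_ne_nil _ _)
        · have hcc : (c' == c) = false := beq_eq_false_iff_ne.mpr (fun h => hc h.symm)
          simp [List.splitOnP_cons, hsp, hcc]
theorem splitOn_single (s : List Char) (c : Char) :
    PySem.Chars.splitOn s [c] = s.splitOn c := by
  rw [PySem.Chars.splitOn, go_eq c _ s [] [] (by omega)]
  simp [List.splitOn, modifyHead_id']

theorem not_mem_splitOn (s : List Char) (c : Char) :
    ∀ l ∈ s.splitOn c, c ∉ l := by
  induction s with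
  | nil => intro l hl; simp [List.splitOn] at hl; simp [hl]
  | cons x xs ih =>
    intro l hl
    simp only [List.splitOn] at hl ih
    rw [List.splitOnP_cons] at hl
    by_cases hx : x = c
    · simp [hx] at hl
      rcases hl with h | h
      · simp [h]
      · exact ih l h
    · rw [if_neg (by simp [hx])] at hl
      rcases hsp : List.splitOnP (fun y => y == c) xs with _ | ⟨hd, tl⟩
      · exact absurd hsp (List.splitOnP_ne_nil _ _)
      · rw [hsp] at hl
        simp at hl
        rcases hl with h | h
        · subst h
          intro hmem
          rcases List.mem_cons.mp hmem with h | h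
          · exact hx h.symm
          · exact ih hd (by simp [hsp]) h
        · exact ih l (by simp [hsp, h])

theorem intercalate_single (c : Char) (x : List Char) : [c].intercalate [x] = x := by
  simp [List.intercalate, List.intersperse]

theorem intercalate_cons₂ (c : Char) (x y : List Char) (t : List (List Char)) :
    [c].intercalate (x :: y :: t) = x ++ c :: [c].intercalate (y :: t) := by
  simp [List.intercalate, List.intersperse]


theorem intercalate_cons₂' (c : Char) (x : List Char) (L : List (List Char)) (h : L ≠ []) :
    [c].intercalate (x :: L) = x ++ c :: [c].intercalate L := by
  cases L with
  | nil => exact absurd rfl h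
  | cons y t => exact intercalate_cons₂ c x y t

theorem boundary (c : Char) (L : List (List Char)) :
    (∀ l ∈ L, c ∉ l) → ∀ k : List Char,
    ((k ++ [c] <+: [c].intercalate L) ↔
      ∃ i : ℕ, 1 ≤ i ∧ i < L.length ∧ k = [c].intercalate (L.take i)) := by
  induction L with
  | nil =>
    intro _ k
    simp [List.intercalate]
  | cons x L' ih =>
    intro hL k
    have hxfree : c ∉ x := hL x (by simp)
    cases L' with
    | nil =>
      rw [intercalate_single]
      constructor
      · intro hp
        exact absurd (hp.subset (by simp)) hxfree
      · rintro ⟨i, h1, h2, _⟩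
        simp at h2; omega
    | cons y t =>
      have hMfree : ∀ l ∈ (y :: t), c ∉ l := fun l hl => hL l (by simp [hl])
      rw [intercalate_cons₂]
      constructor
      · intro hp
        have hx : x <+: x ++ c :: [c].intercalate (y :: t) := List.prefix_append _ _
        have hk0 : k <+: x ++ c :: [c].intercalate (y :: t) := (List.prefix_append k [c]).trans hp
        rcases Nat.lt_trichotomy k.length x.length with hlt | heq | hgt
        · have h1 : k ++ [c] <+: x :=
            List.prefix_of_prefix_length_le hp hx (by simp; omega)
          exact absurd (h1.subset (by simp)) hxfree
        · have hk : k = x :=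
            (List.prefix_of_prefix_length_le hk0 hx (by omega)).eq_of_length heq
          exact ⟨1, le_refl 1, by simp, by rw [hk]; simp [intercalate_single]⟩
        · have hxk : x <+: k := List.prefix_of_prefix_length_le hx hk0 (by omega)
          obtain ⟨k2, rfl⟩ := hxk
          rw [List.append_assoc, List.prefix_append_right_inj] at hp
          cases k2 with
          | nil => simp at hgt
          | cons d k3 =>
            rw [List.cons_append, List.cons_prefix_cons] at hp
            obtain ⟨hd, hp3⟩ := hp
            subst hd
            rcases (ih hMfree k3).mp hp3 with ⟨j, hj1, hj2, hj3⟩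
            refine ⟨j + 1, by omega, by simp only [List.length_cons] at hj2 ⊢; omega, ?_⟩
            have hne : (y :: t).take j ≠ [] := by
              intro h0
              have := congrArg List.length h0
              simp at this; omega
            rw [List.take_cons]
            simp only [Nat.add_sub_cancel]
            rw [intercalate_cons₂' _ x _ hne, hj3]
            omega
      · rintro ⟨i, h1, h2, hk⟩
        rcases i with _ | j
        · omega
        rcases j with _ | j'
        · -- i = 1
          have : k = x := by rw [hk]; simp [intercalate_single]
          subst this
          simp
        · -- i = j' + 2
          have hj : 1 ≤ j' + 1 := by omega
          have hj2 : j' + 1 < (y :: t).length := by simp at h2 ⊢; omega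
          have hk3 := (ih hMfree ([c].intercalate ((y :: t).take (j' + 1)))).mpr
            ⟨j' + 1, hj, hj2, rfl⟩
          have hne : (y :: t).take (j' + 1) ≠ [] := by
            intro h0
            have := congrArg List.length h0
            simp at this
          rw [hk, List.take_cons]
          simp only [Nat.add_sub_cancel]
          rw [intercalate_cons₂' c x _ hne]
          rw [List.append_assoc, List.cons_append]
          refine (List.prefix_append_right_inj x).mpr
            (by rw [List.cons_prefix_cons]; exact ⟨rfl, hk3⟩)
          omega


-- The set A enumerates with '.'.join(parts[:i]) is exactly {p} ∪ {k | k ++ '.' is a prefix of p}.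
theorem prefix_char (p k : List Char) :
    (∃ i : ℤ, 0 < i ∧ i ≤ ((PySem.Chars.splitOn p ['.']).length : ℤ) ∧
        k = PySem.Chars.join ['.'] (PySem.List.slice (PySem.Chars.splitOn p ['.']) none (some i)))
      ↔ (k = p ∨ k ++ ['.'] <+: p) := by
  rw [splitOn_single]
  constructor
  · rintro ⟨i, hi0, hile, hk⟩
    rw [PySem.List.slice_to (p.splitOn '.') (by omega)] at hk
    simp only [PySem.Chars.join] at hk
    rcases eq_or_lt_of_le hile with heq | hlt
    · left
      have : i.toNat = (p.splitOn '.').length := by omega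
      rw [hk, this, List.take_length]
      exact List.intercalate_splitOn p '.'
    · right
      have hb := (boundary '.' (p.splitOn '.') (not_mem_splitOn p '.') k).mpr
        ⟨i.toNat, by omega, by omega, hk⟩
      rwa [List.intercalate_splitOn p '.'] at hb
  · intro h
    have hlen : 1 ≤ (p.splitOn '.').length :=
      List.length_pos_of_ne_nil (List.splitOnP_ne_nil _ _)
    rcases h with hk | hpre
    · refine ⟨((p.splitOn '.').length : ℤ), by omega, le_refl _, ?_⟩
      rw [PySem.List.slice_to (p.splitOn '.') (by omega)]
      simp only [PySem.Chars.join, Int.toNat_natCast, List.take_length]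
      rw [hk, List.intercalate_splitOn p '.']
    · rw [← List.intercalate_splitOn p '.'] at hpre
      rcases (boundary '.' (p.splitOn '.') (not_mem_splitOn p '.') k).mp hpre
        with ⟨i, hi1, hi2, hk⟩
      refine ⟨(i : ℤ), by omega, by omega, ?_⟩
      rw [PySem.List.slice_to (p.splitOn '.') (by omega)]
      simpa [PySem.Chars.join] using hk

-- ===== VERDICT (by name: the statement is the Claim_ definition above) =====
theorem has_permission_in_keys_py_spec : Claim_equal_has_permission_in_keys_py := by
  intro permission permission_keys _
  unfold Spec_has_permission_in_keys_py
  unfold has_permission_in_keys_py has_permission_in_keys_py_alt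
  by_cases hp : permission.toList = []
  · simp [hp]
  · simp only [if_neg hp]
    rcases hK : permission_keys with _ | ⟨k0, krest⟩
    · simp
    · rw [← hK]
      have hKne : permission_keys.map String.toList ≠ [] := by
        simp [hK]
      rw [if_neg hKne]
      rw [Bool.eq_iff_iff]
      constructor
      · intro hA
        split_ifs at hA with h1 h2
        · -- contains p
          rcases List.contains_iff_mem.mp h1 with hmem
          rcases List.mem_map.mp hmem with ⟨key, hkey, hkp⟩
          refine List.any_eq_true.mpr ⟨key, hkey, ?_⟩
          simp [hkp]
        · -- range any
          rcases List.any_eq_true.mp h2 with ⟨i, hiR, hic⟩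
          have hi := (PySem.List.mem_pyRange_iff_of_neg (by omega) i).mp hiR
          rcases List.contains_iff_mem.mp hic with hmem
          rcases List.mem_map.mp hmem with ⟨key, hkey, hkp⟩
          have hchar := (prefix_char permission.toList key.toList).mp
            ⟨i, by omega, by omega, hkp⟩
          refine List.any_eq_true.mpr ⟨key, hkey, ?_⟩
          rcases hchar with h | h
          · simp [h]
          · simp [PySem.Chars.startswith_iff, h]
        · -- descendant any
          rcases List.any_eq_true.mp hA with ⟨k, hkmem, hks⟩
          rcases List.mem_map.mp hkmem with ⟨key, hkey, hkp⟩
          refine List.any_eq_true.mpr ⟨key, hkey, ?_⟩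
          subst hkp
          simp [hks]
      · intro hB
        rcases List.any_eq_true.mp hB with ⟨key, hkey, hkcond⟩
        simp only [Bool.or_eq_true, beq_iff_eq, PySem.Chars.startswith_iff] at hkcond
        rcases hkcond with (h1 | h2) | h3
        · -- key == p
          rw [if_pos (List.contains_iff_mem.mpr
            (List.mem_map.mpr ⟨key, hkey, h1⟩))]
        · -- ancestor: key ++ '.' prefix of p
          have hpre : key.toList ++ ['.'] <+: permission.toList := h2
          rcases (prefix_char permission.toList key.toList).mpr (Or.inr hpre)
            with ⟨i, hi0, hile, hk⟩
          have hR : i ∈ PySem.List.pyRange ((PySem.Chars.splitOn permission.toList ['.']).length : Int) 0 (-1) :=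
            (PySem.List.mem_pyRange_iff_of_neg (by omega) i).mpr
              ⟨by omega, by omega, ⟨-(i - ((PySem.Chars.splitOn permission.toList ['.']).length : Int)), by ring⟩⟩
          have h2' : (PySem.List.pyRange ((PySem.Chars.splitOn permission.toList ['.']).length : Int) 0 (-1)).any
              (fun i => (permission_keys.map String.toList).contains
                (PySem.Chars.join ['.'] (PySem.List.slice (PySem.Chars.splitOn permission.toList ['.']) none (some i)))) = true :=
            List.any_eq_true.mpr ⟨i, hR, List.contains_iff_mem.mpr
              (List.mem_map.mpr ⟨key, hkey, hk⟩)⟩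
          split_ifs <;> simp_all
        · -- descendant
          have h3' : (permission_keys.map String.toList).any
              (fun k => PySem.Chars.startswith k (permission.toList ++ ['.'])) = true :=
            List.any_eq_true.mpr ⟨key.toList, List.mem_map.mpr ⟨key, hkey, rfl⟩,
              by simp [PySem.Chars.startswith_iff, h3]⟩
          split_ifs <;> simp_all
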